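-- pv_equiv track=rewrite | github.com/Eystei/pymar2024 | home_work/hw_9/strings_with_symb/strings_with_symb.py | remove_char_with_next_hash_sign
-- ===== SOURCE A (Python) =====
-- def remove_char_with_next_hash_sign(text: str) -> str:
--     """    Remove characters followed by a hash sign from the text.
--     """
--     i = 0
--     while i < len(text) - 1:
--         if text[i + 1] == '#':
--             text = text[:i] + text[i + 2:]
--             if i > 0:
--                 i -= 1
--         else:
--             i += 1
--     return text
-- ===== SOURCE B (Python) =====
-- def remove_char_with_next_hash_sign(text: str) -> str:
--     """Remove characters followed by a hash sign from the text."""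
--     stack = []
--     for c in text:
--         if c == '#' and stack:
--             stack.pop()
--         else:
--             stack.append(c)
--     return ''.join(stack)
-- ===== Notes on version B (the rewrite author's own statement) =====
-- stated objective: faster
-- what changed: Replaced A's index-rewinding while loop that repeatedly reslices the string (quadratic) by a single left-to-right pass with a stack that pops the previous kept character on '#' (or keeps a '#' seen with empty stack), then joins.
import Mathlib
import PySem

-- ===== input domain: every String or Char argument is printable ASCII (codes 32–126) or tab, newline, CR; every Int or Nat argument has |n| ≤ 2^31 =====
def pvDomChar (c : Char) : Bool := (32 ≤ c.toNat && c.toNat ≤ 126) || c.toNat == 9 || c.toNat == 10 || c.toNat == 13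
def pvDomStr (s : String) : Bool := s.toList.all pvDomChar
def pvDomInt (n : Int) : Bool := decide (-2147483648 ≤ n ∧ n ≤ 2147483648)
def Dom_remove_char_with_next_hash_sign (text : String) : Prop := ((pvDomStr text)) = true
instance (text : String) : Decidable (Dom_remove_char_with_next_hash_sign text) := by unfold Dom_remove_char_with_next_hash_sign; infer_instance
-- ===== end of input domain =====

-- B replaces A's quadratic reslice-and-rewind loop by one linear stack pass; same result on every input.


-- ===== PORT A =====
-- A's while loop. In Python i starts at 0 and stays ≥ 0, so i is a Nat here; the loop
-- condition `i < len(text) - 1` (Nat subtraction agrees with Python's int subtraction since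
-- it is only ≤-compared against i ≥ 0), the slices text[:i] and text[i+2:] with i ≥ 0 are
-- exactly List.take i / List.drop (i+2), and `if i > 0: i -= 1` is exactly Nat `i - 1`.
-- The while loop, as structural recursion on a fuel bound: the measure length - i strictly
-- decreases each iteration, so fuel = length of the original text always suffices (proved in
-- pvLoopA_eq below); the fuel is a totality guard only, the loop body is A's verbatim.
def pvLoopA (fuel : Nat) (text : List Char) (i : Nat) : List Char :=
  match fuel with
  | 0 => text
  | fuel + 1 =>
    if h : i < text.length - 1 then
      if text[i + 1]'(by omega) = '#' then
        pvLoopA fuel (text.take i ++ text.drop (i + 2)) (i - 1)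
      else
        pvLoopA fuel text (i + 1)
    else text

def remove_char_with_next_hash_sign (text : String) : String :=
  String.ofList (pvLoopA text.toList.length text.toList 0)

-- ===== PORT B =====
-- B's for loop over the characters, with `stack` kept in reverse (Python pops the last
-- element; here the head).
def pvGoB (stack : List Char) : List Char → List Char
  | [] => stack.reverse
  | c :: rest =>
    if c = '#' ∧ stack ≠ [] then pvGoB stack.tail rest
    else pvGoB (c :: stack) rest

def remove_char_with_next_hash_sign_alt (text : String) : String :=
  String.ofList (pvGoB [] text.toList)

-- ===== PRECONDITION & SPEC =====
def Spec_remove_char_with_next_hash_sign (text : String) (out : String) : Prop := out = remove_char_with_next_hash_sign_alt text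
instance (text : String) (out : String) : Decidable (Spec_remove_char_with_next_hash_sign text out) := by unfold Spec_remove_char_with_next_hash_sign; infer_instance

-- ===== CLAIM (what is proved, stated in full; the proofs are below) =====
def Claim_equal_remove_char_with_next_hash_sign : Prop := ∀ (text : String), Dom_remove_char_with_next_hash_sign text → Spec_remove_char_with_next_hash_sign text (remove_char_with_next_hash_sign text)

-- ===== LEMMAS AND PROOFS =====

-- One step of B on a nonempty suffix with empty stack always pushes the first character
-- (a '#' is pushed too, since the stack is empty).
lemma pvGoB_nil_cons (c : Char) (rest : List Char) :
    pvGoB [] (c :: rest) = pvGoB [c] rest := by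
  simp [pvGoB]

-- B restarted with empty stack equals B with the first character already pushed.
lemma pvGoB_nil_eq (l : List Char) :
    pvGoB [] l = pvGoB (l.take 1).reverse (l.drop 1) := by
  cases l with
  | nil => simp
  | cons c rest =>
    simp only [List.take_succ_cons, List.take_zero, List.drop_succ_cons, List.drop_zero,
      List.reverse_cons, List.reverse_nil, List.nil_append]
    exact pvGoB_nil_cons c rest

-- Core invariant: while A is at index i with no '#' among positions 1..i, A's remaining work
-- equals B resumed with stack = (first i+1 chars, reversed) on the remaining suffix.
lemma pvLoopA_eq (n : Nat) :
    ∀ (t : List Char) (i : Nat), t.length - i ≤ n + 1 →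
    (∀ j (h : j < t.length), 1 ≤ j → j ≤ i → t[j] ≠ '#') →
    pvLoopA n t i = pvGoB (t.take (i + 1)).reverse (t.drop (i + 1)) := by
  induction n with
  | zero =>
    intro t i hn _
    rw [pvLoopA,
      List.take_of_length_le (by omega), List.drop_eq_nil_of_le (by omega)]
    simp [pvGoB]
  | succ n ih =>
    intro t i hn hinv
    rw [pvLoopA]
    by_cases h : i < t.length - 1
    · rw [dif_pos h]
      have hi1 : i + 1 < t.length := by omega
      have hdrop : t.drop (i + 1) = t[i + 1] :: t.drop (i + 2) :=
        List.drop_eq_getElem_cons hi1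
      by_cases hc : t[i + 1] = '#'
      · rw [if_pos hc]
        by_cases hi0 : i = 0
        · -- removal at the front: new text is drop 2, index stays 0
          subst hi0
          simp only [Nat.zero_add] at hdrop hc hi1 ⊢
          simp only [List.take_zero, List.nil_append, Nat.zero_sub]
          rw [ih (t.drop 2) 0 (by simp only [List.length_drop]; omega)
            (by intro j hj h1 h0; omega)]
          rw [← pvGoB_nil_eq, hdrop]
          have htake : t.take 1 = [t[0]'(by omega)] := by
            cases t with
            | nil => simp at hi1
            | cons a l => simp
          rw [htake]
          simp [pvGoB, hc]
        · -- removal with i > 0: B pops t[i], index becomes i-1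
          have hip : 1 ≤ i := by omega
          have hilen : i < t.length := by omega
          have hlen_take : (t.take i).length = i := by simp; omega
          have htk : (t.take i ++ t.drop (i + 2)).take i = t.take i :=
            List.take_left' hlen_take
          have hdr : (t.take i ++ t.drop (i + 2)).drop i = t.drop (i + 2) :=
            List.drop_left' hlen_take
          rw [ih (t.take i ++ t.drop (i + 2)) (i - 1)
            (by simp only [List.length_append, List.length_take, List.length_drop]; omega)
            (by
              intro j hj h1 h2
              have hj2 : j < (t.take i).length := by
                simp only [List.length_take]; omega
              rw [List.getElem_append_left hj2, List.getElem_take]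
              exact hinv j (by omega) h1 (by omega))]
          have hi1e : i - 1 + 1 = i := by omega
          rw [hi1e, htk, hdr, hdrop]
          have htake1 : t.take (i + 1) = t.take i ++ [t[i]] := by
            rw [List.take_add_one]; simp [List.getElem?_eq_getElem hilen]
          rw [htake1]
          simp only [List.reverse_append, List.reverse_cons, List.reverse_nil,
            List.nil_append, List.singleton_append]
          rw [hc]
          simp [pvGoB]
      · -- no removal: advance i
        rw [if_neg hc]
        rw [ih t (i + 1) (by omega)
          (by
            intro j hj h1 h2
            rcases Nat.lt_or_ge j (i + 1) with hlt | hge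
            · exact hinv j hj h1 (by omega)
            · have : j = i + 1 := by omega
              subst this; exact hc)]
        rw [hdrop]
        have htake1 : t.take (i + 2) = t.take (i + 1) ++ [t[i + 1]] := by
          rw [List.take_add_one]; simp [List.getElem?_eq_getElem hi1]
        rw [htake1]
        simp only [List.reverse_append, List.reverse_cons, List.reverse_nil,
          List.nil_append, List.singleton_append]
        show _ = pvGoB ((t.take (i + 1)).reverse) (t[i + 1] :: t.drop (i + 2))
        simp [pvGoB, hc]
    · rw [dif_neg h,
        List.take_of_length_le (by omega), List.drop_eq_nil_of_le (by omega)]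
      simp [pvGoB]

lemma pvLoopA_zero (t : List Char) : pvLoopA t.length t 0 = pvGoB [] t := by
  rw [pvLoopA_eq t.length t 0 (by omega) (by intro j hj h1 h2; omega),
    Nat.zero_add, ← pvGoB_nil_eq]

-- ===== VERDICT (by name: the statement is the Claim_ definition above) =====
theorem remove_char_with_next_hash_sign_spec : Claim_equal_remove_char_with_next_hash_sign := by
  intro text _
  unfold Spec_remove_char_with_next_hash_sign remove_char_with_next_hash_sign remove_char_with_next_hash_sign_alt
  rw [pvLoopA_zero]
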